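-- pv_equiv track=rewrite | github.com/Palak807/DataStructQA | Stack/maximum difference.py | findMaxDiff
-- ===== SOURCE A (Python) =====
-- def left(arr, n, SE):
--
-- 	stack = []
-- 	for i in range(n):
--
-- 		while(stack != [] and stack[len(stack)-1] >= arr[i]):
-- 			stack.pop()
--
-- 		if(stack != []):
-- 			SE[i]=stack[len(stack)-1]
-- 		else:
-- 			SE[i]
-- 		stack.append(arr[i])
--
-- def findMaxDiff(arr, n):
-- 	ls=[0]*n
-- 	rs=[0]*n
--
-- 	left(arr, n, ls)
--
-- 	left(arr[::-1], n, rs)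
-- 	res = -1
-- 	for i in range(n):
-- 		res = max(res, abs(ls[i] - rs[n-1-i]))
-- 	return res
-- ===== SOURCE B (Python) =====
-- def findMaxDiff(arr, n):
--     rev = arr[::-1]
--
--     def nearest_smaller_left(xs, k):
--         xk = xs[k]
--         for j in range(k - 1, -1, -1):
--             if xs[j] < xk:
--                 return xs[j]
--         return 0
--
--     res = -1
--     for i in range(n):
--         lv = nearest_smaller_left(arr, i)
--         rv = nearest_smaller_left(rev, n - 1 - i)
--         res = max(res, abs(lv - rv))
--     return res
-- ===== Notes on version B (the rewrite author's own statement) =====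
-- stated objective: simpler
-- what changed: Replaces the two mutating monotonic-stack passes over arr and arr[::-1] with a direct per-index backward scan for the nearest strictly-smaller element on each side (same reversed-window semantics), no stacks and no preallocated output arrays.
import Mathlib
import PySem

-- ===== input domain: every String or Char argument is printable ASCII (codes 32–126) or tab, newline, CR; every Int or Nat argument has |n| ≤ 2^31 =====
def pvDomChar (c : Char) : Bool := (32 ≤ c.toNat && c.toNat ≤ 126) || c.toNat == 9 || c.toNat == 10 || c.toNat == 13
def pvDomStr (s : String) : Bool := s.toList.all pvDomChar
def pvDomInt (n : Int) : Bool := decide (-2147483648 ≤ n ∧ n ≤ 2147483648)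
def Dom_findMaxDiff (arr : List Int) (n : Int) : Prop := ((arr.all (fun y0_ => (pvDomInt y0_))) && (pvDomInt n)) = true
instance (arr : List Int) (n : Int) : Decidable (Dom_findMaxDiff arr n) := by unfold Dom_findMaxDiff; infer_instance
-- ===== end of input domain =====

-- B replaces A's two monotonic-stack passes (over arr and arr[::-1], writing into
-- preallocated arrays) by direct per-index backward scans for the nearest strictly
-- smaller element; objective: simpler. A mutates no caller-visible argument.

-- ===== PORT A =====
-- while stack != [] and stack[-1] >= x: stack.pop()   (stack held top-first)
def popWhile (stack : List Int) (x : Int) : List Int :=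
  match stack with
  | [] => []
  | t :: rest => if t ≥ x then popWhile rest x else t :: rest

-- one iteration of the for-loop body of `left` (state: stack, SE)
def leftStep (arr : List Int) (st : List Int × List Int) (i : Int) : List Int × List Int :=
  let x := PySem.List.pyGetD arr i 0   -- arr[i]; in range under Pre_
  let stack := popWhile st.1 x
  let se := if stack.isEmpty then st.2 else st.2.set i.toNat (stack.headD 0)
  (x :: stack, se)

-- def left(arr, n, SE): returns the mutated SE
def leftA (arr : List Int) (n : Int) (SE : List Int) : List Int :=
  ((PySem.List.pyRange 0 n 1).foldl (leftStep arr) ([], SE)).2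

def findMaxDiff (arr : List Int) (n : Int) : Int :=
  let ls := leftA arr n (List.replicate n.toNat 0)
  let rs := leftA ((PySem.List.slice? arr none none (-1)).getD []) n (List.replicate n.toNat 0)
  (PySem.List.pyRange 0 n 1).foldl
    (fun res i => max res |PySem.List.pyGetD ls i 0 - PySem.List.pyGetD rs (n - 1 - i) 0|) (-1)

-- ===== PORT B =====
-- the countdown loop `for j in range(k-1, -1, -1): if xs[j] < xk: return xs[j]` / `return 0`,
-- with the current index j written as m-1 so the recursion is structural on m
def nslGo (xs : List Int) (xk : Int) : Nat → Int
  | 0 => 0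
  | m + 1 =>
      let v := PySem.List.pyGetD xs (m : Int) 0   -- xs[j]; in range under Pre_
      if v < xk then v else nslGo xs xk m

-- xk = xs[k] (in range under Pre_), then the backward scan
def nsl (xs : List Int) (k : Int) : Int := nslGo xs (PySem.List.pyGetD xs k 0) k.toNat

def findMaxDiff_alt (arr : List Int) (n : Int) : Int :=
  let rev := arr.reverse
  (PySem.List.pyRange 0 n 1).foldl
    (fun res i => max res |nsl arr i - nsl rev (n - 1 - i)|) (-1)

-- ===== PRECONDITION & SPEC =====
-- Pre_ excludes exactly the inputs on which Python A raises IndexError: n > len(arr)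
-- (B raises there too).
def Pre_findMaxDiff (arr : List Int) (n : Int) : Prop := n ≤ (arr.length : Int)
instance (arr : List Int) (n : Int) : Decidable (Pre_findMaxDiff arr n) := by
  unfold Pre_findMaxDiff; infer_instance

def pvWitness_findMaxDiff : List Int × Int := ([4, 1, 3, 2], 4)

def Spec_findMaxDiff (arr : List Int) (n : Int) (out : Int) : Prop := out = findMaxDiff_alt arr n
instance (arr : List Int) (n : Int) (out : Int) : Decidable (Spec_findMaxDiff arr n out) := by unfold Spec_findMaxDiff; infer_instance

-- ===== CLAIM (what is proved, stated in full; the proofs are below) =====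
def Claim_equal_findMaxDiff : Prop := ∀ (arr : List Int) (n : Int), Dom_findMaxDiff arr n → Pre_findMaxDiff arr n → Spec_findMaxDiff arr n (findMaxDiff arr n)

-- ===== LEMMAS AND PROOFS =====

-- the stack held by A's `left` pass after processing indices 0..i-1
def stackAt (arr : List Int) : Nat → List Int
  | 0 => []
  | i + 1 => PySem.List.pyGetD arr (i : Int) 0 ::
      popWhile (stackAt arr i) (PySem.List.pyGetD arr (i : Int) 0)

-- the SE array held by A's `left` pass after processing indices 0..i-1
def seAt (arr : List Int) (SE : List Int) : Nat → List Int
  | 0 => SE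
  | i + 1 =>
      if (popWhile (stackAt arr i) (PySem.List.pyGetD arr (i : Int) 0)).isEmpty
        then seAt arr SE i
        else (seAt arr SE i).set i
          ((popWhile (stackAt arr i) (PySem.List.pyGetD arr (i : Int) 0)).headD 0)

theorem popWhile_popWhile (s : List Int) (x y : Int) (h : x ≤ y) :
    popWhile (popWhile s y) x = popWhile s x := by
  induction s with
  | nil => simp [popWhile]
  | cons t rest ih =>
      by_cases hty : t ≥ y
      · have : t ≥ x := le_trans h hty
        simp [popWhile, hty, this, ih]
      · simp [popWhile, hty]

-- the top of the stack after popping everything ≥ x is exactly B's backward scan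
theorem headD_popWhile_stackAt (arr : List Int) (x : Int) (i : Nat) :
    (popWhile (stackAt arr i) x).headD 0 = nslGo arr x i := by
  induction i with
  | zero => simp [stackAt, popWhile, nslGo]
  | succ i ih =>
      by_cases hv : PySem.List.pyGetD arr (i : Int) 0 ≥ x
      · have hlt : ¬ (PySem.List.pyGetD arr (i : Int) 0 < x) := by omega
        simp only [stackAt, popWhile, if_pos hv, nslGo, hlt, if_false,
          popWhile_popWhile _ _ _ hv, ih]
      · have hlt : PySem.List.pyGetD arr (i : Int) 0 < x := by omega
        simp only [stackAt, popWhile, if_neg hv, nslGo, hlt, if_true, List.headD_cons]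

theorem foldl_leftStep (arr SE : List Int) (m : Nat) :
    (List.range m).foldl (fun st (k : Nat) => leftStep arr st (k : Int)) ([], SE)
      = (stackAt arr m, seAt arr SE m) := by
  induction m with
  | zero => simp [stackAt, seAt]
  | succ m ih =>
      rw [List.range_succ, List.foldl_append, ih]
      simp only [List.foldl_cons, List.foldl_nil, leftStep, stackAt, seAt, Int.toNat_natCast]

theorem leftA_eq (arr SE : List Int) (n : Int) :
    leftA arr n SE = seAt arr SE n.toNat := by
  unfold leftA
  rw [PySem.List.pyRange_one, List.foldl_map]
  simp only [Int.sub_zero, zero_add]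
  rw [foldl_leftStep arr SE n.toNat]

theorem length_seAt (arr SE : List Int) (m : Nat) : (seAt arr SE m).length = SE.length := by
  induction m with
  | zero => rfl
  | succ m ih => unfold seAt; split <;> simp [ih]

theorem seAt_getElem?_ge (arr SE : List Int) (m k : Nat) (hk : m ≤ k) :
    (seAt arr SE m)[k]? = SE[k]? := by
  induction m with
  | zero => rfl
  | succ m ih =>
      unfold seAt
      split
      · exact ih (by omega)
      · rw [List.getElem?_set_ne (by omega)]
        exact ih (by omega)

theorem seAt_get (arr SE : List Int) (k m : Nat) (hk : k < m) (hlen : k < SE.length) :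
    PySem.List.pyGetD (seAt arr SE m) (k : Int) 0
      = if (popWhile (stackAt arr k) (PySem.List.pyGetD arr (k : Int) 0)).isEmpty
          then PySem.List.pyGetD SE (k : Int) 0
          else (popWhile (stackAt arr k) (PySem.List.pyGetD arr (k : Int) 0)).headD 0 := by
  induction m with
  | zero => omega
  | succ m ih =>
      rcases Nat.lt_succ_iff_lt_or_eq.mp hk with h | h
      · unfold seAt
        split
        · exact ih h
        · rw [PySem.List.pyGetD_natCast, List.getD_eq_getElem?_getD,
            List.getElem?_set_ne (by omega), ← List.getD_eq_getElem?_getD,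
            ← PySem.List.pyGetD_natCast, ih h]
      · subst h
        unfold seAt
        split
        · have hg := seAt_getElem?_ge arr SE k k le_rfl
          simp only [PySem.List.pyGetD_natCast, List.getD_eq_getElem?_getD, hg]
        · rw [PySem.List.pyGetD_natCast, List.getD_eq_getElem?_getD,
            List.getElem?_set_self (by rw [length_seAt]; exact hlen)]
          rfl

-- SE value at k when SE starts as all zeros: exactly B's nearest-smaller scan
theorem seAt_zero_get (arr : List Int) (N : Nat) (k : Nat) (hk : k < N) :
    PySem.List.pyGetD (seAt arr (List.replicate N 0) N) (k : Int) 0 = nsl arr (k : Int) := by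
  rw [seAt_get arr _ k N hk (by simp [hk])]
  have h0 : PySem.List.pyGetD (List.replicate N (0 : Int)) (k : Int) 0 = 0 := by
    rw [PySem.List.pyGetD_natCast]; simp [List.getD]
  rw [h0]
  unfold nsl
  rw [Int.toNat_natCast, ← headD_popWhile_stackAt arr _ k]
  split
  · rename_i he
    rw [List.isEmpty_iff.mp he]
    rfl
  · rfl

theorem findMaxDiff_eq_alt (arr : List Int) (n : Int) :
    findMaxDiff arr n = findMaxDiff_alt arr n := by
  unfold findMaxDiff findMaxDiff_alt
  rw [PySem.List.slice?_none_none_neg_one]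
  simp only [Option.getD_some]
  apply PySem.List.foldl_congr_mem
  intro res i hi
  rw [PySem.List.mem_pyRange_one] at hi
  obtain ⟨hi0, hin⟩ := hi
  have hik : i = ((i.toNat : Nat) : Int) := by omega
  have hls : PySem.List.pyGetD (leftA arr n (List.replicate n.toNat 0)) i 0 = nsl arr i := by
    rw [leftA_eq, hik, seAt_zero_get arr n.toNat i.toNat (by omega), ← hik]
  have hjk : n - 1 - i = (((n - 1 - i).toNat : Nat) : Int) := by omega
  have hrs : PySem.List.pyGetD (leftA arr.reverse n (List.replicate n.toNat 0)) (n - 1 - i) 0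
      = nsl arr.reverse (n - 1 - i) := by
    rw [leftA_eq, hjk, seAt_zero_get arr.reverse n.toNat (n - 1 - i).toNat (by omega), ← hjk]
  rw [hls, hrs]

-- ===== VERDICT (by name: the statement is the Claim_ definition above) =====
theorem findMaxDiff_spec : Claim_equal_findMaxDiff := by
  intro arr n _ _
  unfold Spec_findMaxDiff
  exact findMaxDiff_eq_alt arr n
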